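-- pv_equiv track=rewrite | github.com/AP-MI-2021/lab-3-RaulParaschivBucur | main.py | get_longest_concat_digits_asc
-- ===== SOURCE A (Python) =====
-- def concat_is_ascending(lst):
--     """
--     Verifica daca o lista are concatenarea elementelor cu cifrele in ordine crescatoare
--     """
--     concat = ''
--     for idx in lst:
--         concat += str(idx)
--
--     for idx in range(0, len(concat) - 1):
--         if concat[idx] > concat[idx + 1]:
--             return False
--     return True
--
-- def get_longest_concat_digits_asc(lst: list[int]) -> list[int]:
--     """
--     Input: O lista
--     Output: Cea mai lunga secventa in care concatenarea elementelor are cifrele crescatoare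
--     """
--     result_lst = []
--     maxim = 0
--     for pos1 in range(0, len(lst)):
--         for pos2 in range(pos1, len(lst)):
--             if concat_is_ascending(lst[pos1:pos2 + 1]):
--                 if len(lst[pos1:pos2 + 1]) >= maxim:
--                     maxim = len(lst[pos1:pos2 + 1])
--                     result_lst = lst[pos1:pos2 + 1]
--     return result_lst
-- ===== SOURCE B (Python) =====
-- def get_longest_concat_digits_asc(lst):
--     """
--     Input: O lista
--     Output: Cea mai lunga secventa in care concatenarea elementelor are cifrele crescatoare
--     """
--     n = len(lst)
--     reps = [str(x) for x in lst]
--     # per element: digits (chars) of str(x) internally non-decreasing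
--     ok = [all(s[i] <= s[i + 1] for i in range(len(s) - 1)) for s in reps]
--     # per boundary: last char of str(lst[i]) <= first char of str(lst[i+1])
--     link = [reps[i][-1] <= reps[i + 1][0] for i in range(n - 1)]
--     # m[i] = length of the longest valid segment starting at i (right-to-left, one pass)
--     m = [0] * n
--     for i in range(n - 1, -1, -1):
--         if ok[i]:
--             if i + 1 < n and link[i] and m[i + 1] > 0:
--                 m[i] = m[i + 1] + 1
--             else:
--                 m[i] = 1
--     # last start achieving the maximal length wins, as with A's >= update
--     best_len, best_start = 0, 0
--     for i, mi in enumerate(m):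
--         if mi > 0 and mi >= best_len:
--             best_len, best_start = mi, i
--     return lst[best_start:best_start + best_len]
-- ===== Notes on version B (the rewrite author's own statement) =====
-- stated objective: faster
-- what changed: Replaces A's scan of all O(n^2) subsegments (each re-concatenated and re-checked character by character) with a single right-to-left pass that computes, from per-element digit order and a boundary-character check, the length of the longest valid segment starting at each index, then one left-to-right scan for the last longest run.
import Mathlib
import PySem

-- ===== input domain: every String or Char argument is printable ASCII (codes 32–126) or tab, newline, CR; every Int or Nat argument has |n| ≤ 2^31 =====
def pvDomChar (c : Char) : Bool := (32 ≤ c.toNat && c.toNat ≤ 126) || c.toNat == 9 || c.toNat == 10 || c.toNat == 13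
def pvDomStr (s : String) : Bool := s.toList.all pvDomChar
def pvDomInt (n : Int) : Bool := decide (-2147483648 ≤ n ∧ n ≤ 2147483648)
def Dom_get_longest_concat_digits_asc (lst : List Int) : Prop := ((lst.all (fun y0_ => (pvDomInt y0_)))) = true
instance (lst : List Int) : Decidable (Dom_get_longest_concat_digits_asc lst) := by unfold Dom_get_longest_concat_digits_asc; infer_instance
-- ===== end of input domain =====

-- B replaces A's O(n^3) scan of all subsegments (each re-concatenated and re-checked) by a single
-- right-to-left pass that computes, from per-element digit order and boundary-character checks, the
-- length of the longest valid segment starting at each index (objective: faster).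

-- ===== PORT A =====
-- chars of str(idx)
def pvStrChars (x : Int) : List Char := PySem.Int.toChars x

-- the 'for idx in range(0, len(concat) - 1): if concat[idx] > concat[idx+1]: return False' loop
def pvAscChars : List Char → Bool
  | a :: b :: rest => if b < a then false else pvAscChars (b :: rest)
  | _ => true

def concat_is_ascending (lst : List Int) : Bool :=
  let concat := lst.foldl (fun acc idx => acc ++ pvStrChars idx) []
  pvAscChars concat

def get_longest_concat_digits_asc (lst : List Int) : List Int :=
  let n : Int := (lst.length : Int)
  ((PySem.List.pyRange 0 n).foldl (fun (st : List Int × Nat) pos1 =>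
    (PySem.List.pyRange pos1 n).foldl (fun (st : List Int × Nat) pos2 =>
      let seg := PySem.List.slice lst (some pos1) (some (pos2 + 1))
      if concat_is_ascending seg then
        if st.2 ≤ seg.length then (seg, seg.length) else st
      else st) st) (([] : List Int), 0)).1

-- ===== PORT B =====
-- all(s[i] <= s[i+1] for i in range(len(s)-1))
def pvAllAdjLe : List Char → Bool
  | a :: b :: rest => decide (a ≤ b) && pvAllAdjLe (b :: rest)
  | _ => true

def pvOk (x : Int) : Bool := pvAllAdjLe (PySem.Int.toChars x)

-- str(x)[-1] <= str(y)[0]; exact: str(n) is never empty, so the none branches are unreachable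
def pvLink (x y : Int) : Bool :=
  match (PySem.Int.toChars x).getLast?, (PySem.Int.toChars y).head? with
  | some c, some d => decide (c ≤ d)
  | _, _ => true

-- the right-to-left m[i] loop of Source B: m[i] ← m[i+1] (head of the already-computed tail list)
def pvRuns : List Int → List Nat
  | [] => []
  | x :: rest =>
    let ms := pvRuns rest
    let mx : Nat :=
      if pvOk x then
        match rest.head?, ms.head? with
        | some y, some my => if pvLink x y && decide (0 < my) then my + 1 else 1
        | _, _ => 1
      else 0
    mx :: ms

def get_longest_concat_digits_asc_alt (lst : List Int) : List Int :=
  let m := pvRuns lst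
  let best := (PySem.List.enumerate m).foldl
      (fun (st : Nat × Int) p => if 0 < p.2 ∧ st.1 ≤ p.2 then (p.2, p.1) else st) (0, 0)
  PySem.List.slice lst (some best.2) (some (best.2 + (best.1 : Int)))

-- ===== PRECONDITION & SPEC =====
def Spec_get_longest_concat_digits_asc (lst : List Int) (out : List Int) : Prop := out = get_longest_concat_digits_asc_alt lst
instance (lst : List Int) (out : List Int) : Decidable (Spec_get_longest_concat_digits_asc lst out) := by unfold Spec_get_longest_concat_digits_asc; infer_instance

-- ===== CLAIM (what is proved, stated in full; the proofs are below) =====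
def Claim_equal_get_longest_concat_digits_asc : Prop := ∀ (lst : List Int), Dom_get_longest_concat_digits_asc lst → Spec_get_longest_concat_digits_asc lst (get_longest_concat_digits_asc lst)

-- ===== LEMMAS AND PROOFS =====

-- ---- spec-level notions ----
def pvOkP (x : Int) : Prop := List.IsChain (· ≤ ·) (PySem.Int.toChars x)
def pvLinkP (x y : Int) : Prop :=
  ∀ c ∈ (PySem.Int.toChars x).getLast?, ∀ d ∈ (PySem.Int.toChars y).head?, c ≤ d
def pvValidP (l : List Int) : Prop := (∀ x ∈ l, pvOkP x) ∧ List.IsChain pvLinkP l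

-- longest valid segment starting at the head (reference recursion)
def pvRunlen : List Int → Nat
  | [] => 0
  | x :: rest =>
    if pvOk x then
      match rest with
      | [] => 1
      | y :: _ => if pvLink x y && decide (0 < pvRunlen rest) then pvRunlen rest + 1 else 1
    else 0

lemma pvRunlen_singleton (x : Int) : pvRunlen [x] = if pvOk x then 1 else 0 := by
  simp [pvRunlen]

lemma pvRunlen_cons_cons (x y : Int) (r : List Int) :
    pvRunlen (x :: y :: r) =
      if pvOk x then
        (if pvLink x y && decide (0 < pvRunlen (y :: r)) then pvRunlen (y :: r) + 1 else 1)
      else 0 := by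
  conv_lhs => rw [pvRunlen]

-- abstract per-start steps of the two folds
def stepA (lst : List Int) (st : List Int × Nat) (i : Nat) : List Int × Nat :=
  if 0 < pvRunlen (lst.drop i) ∧ st.2 ≤ pvRunlen (lst.drop i) then
    ((lst.drop i).take (pvRunlen (lst.drop i)), pvRunlen (lst.drop i))
  else st
def stepB (lst : List Int) (st : Nat × Int) (i : Nat) : Nat × Int :=
  if 0 < pvRunlen (lst.drop i) ∧ st.1 ≤ pvRunlen (lst.drop i) then
    (pvRunlen (lst.drop i), (i : Int))
  else st

-- ---- str(n) is never empty ----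
lemma pvToDigitsCore_ne (b : Nat) : ∀ (f n : Nat) (l : List Char), l ≠ [] → Nat.toDigitsCore b f n l ≠ []
  | 0, _, _, h => h
  | f + 1, n, l, h => by
    simp only [Nat.toDigitsCore]
    split
    · exact List.cons_ne_nil _ _
    · exact pvToDigitsCore_ne b f (n / b) _ (List.cons_ne_nil _ _)

lemma pvChars_ne_nil (n : Int) : PySem.Int.toChars n ≠ [] := by
  unfold PySem.Int.toChars
  split
  · exact List.cons_ne_nil _ _
  · unfold Nat.toDigits
    simp only [Nat.toDigitsCore]
    split
    · exact List.cons_ne_nil _ _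
    · exact pvToDigitsCore_ne 10 _ _ _ (List.cons_ne_nil _ _)

-- ---- Bool/Prop bridges ----
lemma pvAllAdjLe_iff : ∀ (cs : List Char), pvAllAdjLe cs = true ↔ List.IsChain (· ≤ ·) cs
  | [] => by simp [pvAllAdjLe]
  | [a] => by simp [pvAllAdjLe]
  | a :: b :: t => by
    simp only [pvAllAdjLe, Bool.and_eq_true, decide_eq_true_eq, List.isChain_cons_cons]
    rw [pvAllAdjLe_iff (b :: t)]

lemma pvAscChars_eq : ∀ (cs : List Char), pvAscChars cs = pvAllAdjLe cs
  | [] => rfl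
  | [_] => rfl
  | a :: b :: t => by
    simp only [pvAscChars, pvAllAdjLe]
    by_cases h : b < a
    · simp [h, not_le.mpr h]
    · simp [h, not_lt.mp h]
      exact pvAscChars_eq (b :: t)

lemma pvOk_iff (x : Int) : pvOk x = true ↔ pvOkP x := pvAllAdjLe_iff _

lemma pvLink_iff (x y : Int) : pvLink x y = true ↔ pvLinkP x y := by
  unfold pvLink pvLinkP
  cases e1 : (PySem.Int.toChars x).getLast? <;> cases e2 : (PySem.Int.toChars y).head? <;>
    simp [Option.mem_def]

-- ---- characterisation of concat_is_ascending ----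
lemma pvConcat_iff (l : List Int) : concat_is_ascending l = true ↔ pvValidP l := by
  unfold concat_is_ascending
  rw [PySem.List.foldl_append_eq_flatMap, List.nil_append, pvAscChars_eq, pvAllAdjLe_iff]
  unfold pvStrChars
  rw [List.flatMap_def, List.isChain_flatten (by
    intro hmem
    obtain ⟨x, _, hx⟩ := List.mem_map.mp hmem
    exact pvChars_ne_nil x hx)]
  rw [List.isChain_map]
  unfold pvValidP pvOkP pvLinkP
  simp

lemma pvValidP_cons (x : Int) (t : List Int) :
    pvValidP (x :: t) ↔ pvOkP x ∧ (∀ z ∈ t.head?, pvLinkP x z) ∧ pvValidP t := by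
  unfold pvValidP
  rw [List.forall_mem_cons, List.isChain_cons]
  tauto

-- ---- pvRunlen facts ----
lemma pvRunlen_le_length : ∀ (l : List Int), pvRunlen l ≤ l.length
  | [] => Nat.le_refl 0
  | [x] => by rw [pvRunlen_singleton]; split_ifs <;> simp
  | x :: y :: r => by
    have h := pvRunlen_le_length (y :: r)
    rw [pvRunlen_cons_cons]
    simp only [List.length_cons] at *
    split_ifs <;> omega

lemma pvRunlen_pos_iff (x : Int) (r : List Int) : 0 < pvRunlen (x :: r) ↔ pvOk x = true := by
  cases r with
  | nil => rw [pvRunlen_singleton]; split_ifs with h <;> simp [h]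
  | cons y r' => rw [pvRunlen_cons_cons]; split_ifs with h h2 <;> simp [h]

-- validity of a prefix of length k ≥ 1 is exactly k ≤ pvRunlen
lemma pvTake_valid_iff : ∀ (l : List Int) (k : Nat), 1 ≤ k → k ≤ l.length →
    (pvValidP (l.take k) ↔ k ≤ pvRunlen l)
  | [], k, h1, h2 => by simp at h2; omega
  | _ :: _, 0, h1, _ => by omega
  | x :: r, 1, _, _ => by
    rw [List.take_succ_cons, List.take_zero]
    have hx : pvValidP [x] ↔ pvOkP x := by
      unfold pvValidP
      simp
    rw [hx, ← pvOk_iff]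
    exact (pvRunlen_pos_iff x r).symm
  | x :: r, k + 2, _, h2 => by
    obtain ⟨y, r', rfl⟩ : ∃ y r', r = y :: r' := by
      cases r with
      | nil => simp at h2
      | cons a b => exact ⟨a, b, rfl⟩
    have IH := pvTake_valid_iff (y :: r') (k + 1) (by omega)
      (by simp only [List.length_cons] at h2 ⊢; omega)
    rw [List.take_succ_cons, pvValidP_cons, List.take_succ_cons]
    rw [List.take_succ_cons] at IH
    simp only [List.head?_cons, Option.mem_def, Option.some.injEq, forall_eq']
    rw [IH, ← pvOk_iff, ← pvLink_iff, pvRunlen_cons_cons]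
    cases ho : pvOk x
    · simp
    · cases hl : pvLink x y
      · simp
      · cases h0 : pvRunlen (y :: r') with
        | zero => simp
        | succ n => simp

-- ---- the inner fold of A collapses to stepA ----
lemma pvFold1b (r : List Int) : ∀ (m : Nat) (st : List Int × Nat),
    (List.range m).foldl (fun st k => if st.2 ≤ k + 1 then (r.take (k + 1), k + 1) else st) st
      = if 0 < m ∧ st.2 ≤ m then (r.take m, m) else st
  | 0, st => by simp
  | m + 1, st => by
    rw [List.range_succ, List.foldl_append, pvFold1b r m st]
    simp only [List.foldl_cons, List.foldl_nil]
    split_ifs <;> simp_all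
    all_goals omega

lemma pvFold1a (r : List Int) (m : Nat) : ∀ (L : Nat), m ≤ L → ∀ (st : List Int × Nat),
    (List.range L).foldl
      (fun st k => if k + 1 ≤ m then (if st.2 ≤ k + 1 then (r.take (k + 1), k + 1) else st) else st) st
      = (List.range m).foldl
      (fun st k => if k + 1 ≤ m then (if st.2 ≤ k + 1 then (r.take (k + 1), k + 1) else st) else st) st
  | 0, hL, st => by
    have : m = 0 := by omega
    subst this; rfl
  | L + 1, hL, st => by
    by_cases hm : m = L + 1
    · subst hm; rfl
    · rw [List.range_succ, List.foldl_append]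
      rw [pvFold1a r m L (by omega) st]
      simp only [List.foldl_cons, List.foldl_nil]
      rw [if_neg (by omega)]

lemma pvFold1 (r : List Int) (m L : Nat) (hm : m ≤ L) (st : List Int × Nat) :
    (List.range L).foldl
      (fun st k => if k + 1 ≤ m then (if st.2 ≤ k + 1 then (r.take (k + 1), k + 1) else st) else st) st
      = if 0 < m ∧ st.2 ≤ m then (r.take m, m) else st := by
  rw [pvFold1a r m L hm st]
  rw [PySem.List.foldl_congr_mem _ _
      (fun st k => if st.2 ≤ k + 1 then (r.take (k + 1), k + 1) else st) st
      (by
        intro acc k hk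
        rw [if_pos (by simp at hk; omega)])]
  exact pvFold1b r m st

lemma pvInner_eq (lst : List Int) (i : Nat) (hi : i ≤ lst.length) (st : List Int × Nat) :
    (PySem.List.pyRange (i : Int) (lst.length : Int)).foldl
      (fun (st : List Int × Nat) pos2 =>
        let seg := PySem.List.slice lst (some (i : Int)) (some (pos2 + 1))
        if concat_is_ascending seg then
          if st.2 ≤ seg.length then (seg, seg.length) else st
        else st) st
      = stepA lst st i := by
  rw [PySem.List.pyRange_one]
  have hL : (((lst.length : Int)) - (i : Int)).toNat = lst.length - i := by omega
  rw [hL, List.foldl_map]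
  have hcongr : ∀ (acc : List Int × Nat), ∀ k ∈ List.range (lst.length - i),
      (fun (st : List Int × Nat) (k : Nat) =>
        let seg := PySem.List.slice lst (some (i : Int)) (some ((i : Int) + (k : Int) + 1))
        if concat_is_ascending seg then
          if st.2 ≤ seg.length then (seg, seg.length) else st
        else st) acc k
      = (fun (st : List Int × Nat) (k : Nat) =>
          if k + 1 ≤ pvRunlen (lst.drop i) then
            (if st.2 ≤ k + 1 then ((lst.drop i).take (k + 1), k + 1) else st)
          else st) acc k := by
    intro acc k hk
    simp only [List.mem_range] at hk
    have hcast : ((i : Int) + (k : Int) + 1) = ((i : Int) + ((k + 1 : Nat) : Int)) := by push_cast; ring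
    simp only [hcast, PySem.List.slice_natCast_add]
    have hlen : (((lst.drop i).take (k + 1))).length = k + 1 := by
      simp only [List.length_take, List.length_drop]
      omega
    have hiff : concat_is_ascending ((lst.drop i).take (k + 1)) = true ↔
        k + 1 ≤ pvRunlen (lst.drop i) :=
      (pvConcat_iff _).trans (pvTake_valid_iff (lst.drop i) (k + 1) (by omega)
        (by simp only [List.length_drop]; omega))
    by_cases hv : k + 1 ≤ pvRunlen (lst.drop i)
    · rw [if_pos hv]
      have := hiff.mpr hv
      simp only [this, if_true, hlen]
    · rw [if_neg hv]
      have : concat_is_ascending ((lst.drop i).take (k + 1)) = false := by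
        cases hc : concat_is_ascending ((lst.drop i).take (k + 1))
        · rfl
        · exact absurd (hiff.mp hc) hv
      simp only [this, Bool.false_eq_true, if_false]
  rw [PySem.List.foldl_congr_mem _ _ _ st hcongr]
  have hm : pvRunlen (lst.drop i) ≤ lst.length - i := by
    have := pvRunlen_le_length (lst.drop i)
    simp only [List.length_drop] at this
    exact this
  rw [pvFold1 (lst.drop i) (pvRunlen (lst.drop i)) (lst.length - i) hm st]
  rfl

lemma pvA_eq (lst : List Int) :
    get_longest_concat_digits_asc lst = ((List.range lst.length).foldl (stepA lst) ([], 0)).1 := by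
  unfold get_longest_concat_digits_asc
  dsimp only
  rw [PySem.List.pyRange_zero_natCast, List.foldl_map]
  congr 1
  apply PySem.List.foldl_congr_mem
  intro acc i hi
  simp only [List.mem_range] at hi
  exact pvInner_eq lst i (by omega) acc

-- ---- B collapses to the same indexed fold ----
lemma pvRuns_cons (x : Int) (r : List Int) :
    pvRuns (x :: r) =
      (if pvOk x then
        match r.head?, (pvRuns r).head? with
        | some y, some my => if pvLink x y && decide (0 < my) then my + 1 else 1
        | _, _ => 1
      else 0) :: pvRuns r := rfl

lemma pvRuns_eq_runlen : ∀ (l : List Int), pvRuns l = (List.range l.length).map (fun i => pvRunlen (l.drop i))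
  | [] => rfl
  | x :: r => by
    rw [pvRuns_cons, pvRuns_eq_runlen r]
    rw [List.length_cons, List.range_succ_eq_map, List.map_cons, List.map_map]
    simp only [List.cons.injEq]
    refine ⟨?_, List.map_congr_left (fun i _ => by simp)⟩
    -- the head entry equals pvRunlen (x :: r)
    cases r with
    | nil => simp [pvRunlen]
    | cons y r' =>
      rw [List.length_cons, List.range_succ_eq_map, List.map_cons]
      simp only [List.head?_cons, List.drop_zero]
      simp [pvRunlen]

lemma pvEnum_map {α β : Type} (f : α → β) :
    ∀ (l : List α) (s : Int),
      PySem.List.enumerate (l.map f) s = (PySem.List.enumerate l s).map (fun p => (p.1, f p.2))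
  | [], _ => by simp [PySem.List.enumerate_nil]
  | x :: t, s => by
    rw [List.map_cons, PySem.List.enumerate_cons, PySem.List.enumerate_cons, List.map_cons,
      pvEnum_map f t (s + 1)]

lemma pvB_eq (lst : List Int) :
    get_longest_concat_digits_asc_alt lst =
      PySem.List.slice lst (some ((List.range lst.length).foldl (stepB lst) (0, 0)).2)
        (some (((List.range lst.length).foldl (stepB lst) (0, 0)).2
          + ((((List.range lst.length).foldl (stepB lst) (0, 0)).1 : Nat) : Int))) := by
  unfold get_longest_concat_digits_asc_alt
  dsimp only
  rw [pvRuns_eq_runlen, pvEnum_map, List.foldl_map]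
  have hc := PySem.List.foldl_congr_mem (PySem.List.enumerate (List.range lst.length) 0)
      (fun (st : Nat × Int) (q : Int × Nat) =>
        if 0 < pvRunlen (lst.drop q.2) ∧ st.1 ≤ pvRunlen (lst.drop q.2) then
          (pvRunlen (lst.drop q.2), q.1)
        else st)
      (fun (st : Nat × Int) (q : Int × Nat) => stepB lst st q.2) ((0 : Nat), (0 : Int))
      (by
        intro acc q hq
        rw [PySem.List.mem_enumerate_iff] at hq
        obtain ⟨k, hk, rfl⟩ := hq
        simp [stepB, List.getElem_range])
  rw [hc]
  have hm := List.foldl_map (f := fun (q : Int × Nat) => q.2) (g := stepB lst)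
      (l := PySem.List.enumerate (List.range lst.length) 0) (init := ((0 : Nat), (0 : Int)))
  rw [PySem.List.map_snd_enumerate] at hm
  rw [← hm]

-- ---- the two folds agree ----
lemma pvPair (lst : List Int) : ∀ (idx : List Nat) (stA : List Int × Nat) (stB : Nat × Int),
    stA.2 = stB.1 → 0 ≤ stB.2 → stA.1 = (lst.drop stB.2.toNat).take stB.1 →
    ((idx.foldl (stepA lst) stA).2 = (idx.foldl (stepB lst) stB).1 ∧
     0 ≤ (idx.foldl (stepB lst) stB).2 ∧
     (idx.foldl (stepA lst) stA).1
       = (lst.drop (idx.foldl (stepB lst) stB).2.toNat).take (idx.foldl (stepB lst) stB).1)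
  | [], stA, stB, h1, h2, h3 => ⟨h1, h2, h3⟩
  | i :: t, stA, stB, h1, h2, h3 => by
    simp only [List.foldl_cons]
    apply pvPair lst t
    · unfold stepA stepB
      rw [h1]
      split_ifs <;> simp [h1]
    · unfold stepB
      split_ifs <;> simp [h2]
    · unfold stepA stepB
      rw [h1]
      split_ifs with h
      · simp [Int.toNat_natCast]
      · exact h3

-- ===== VERDICT (by name: the statement is the Claim_ definition above) =====
theorem get_longest_concat_digits_asc_spec : Claim_equal_get_longest_concat_digits_asc := by
  intro lst _
  unfold Spec_get_longest_concat_digits_asc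
  rw [pvA_eq, pvB_eq]
  obtain ⟨h1, h2, h3⟩ := pvPair lst (List.range lst.length) ([], 0) (0, 0) rfl (le_refl 0) (by simp)
  rw [h3]
  conv_rhs => rw [(Int.toNat_of_nonneg h2).symm]
  rw [PySem.List.slice_natCast_add]
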